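-- pv_equiv track=rewrite | github.com/diana7376/Labs-CS | lab1/task_1_3.py | permute_alphabet
-- ===== SOURCE A (Python) =====
-- def permute_alphabet(keyword):
--     # Manual uppercase conversion
--     upper_keyword = ""
--     i = 0
--     while i < len(keyword):
--         c = keyword[i]
--         if 'a' <= c <= 'z':
--             c = chr(ord(c) - (ord('a') - ord('A')))
--         upper_keyword += c
--         i += 1
--     keyword = upper_keyword
--
--     seen = []
--     perm = []
--     i = 0
--     while i < len(keyword):
--         c = keyword[i]
--         # Only accept A-Z and not in seen
--         already = False
--         j = 0
--         while j < len(seen):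
--             if c == seen[j]:
--                 already = True
--                 break
--             j += 1
--         if (not already) and ('A' <= c <= 'Z'):
--             perm.append(c)
--             seen.append(c)
--         i += 1
--     # Add remaining A-Z
--     alphabet = "ABCDEFGHIJKLMNOPQRSTUVWXYZ"
--     i = 0
--     while i < 26:
--         c = alphabet[i]
--         already = False
--         j = 0
--         while j < len(seen):
--             if c == seen[j]:
--                 already = True
--                 break
--             j += 1
--         if not already:
--             perm.append(c)
--             seen.append(c)
--         i += 1
--     return perm
-- ===== SOURCE B (Python) =====
-- def permute_alphabet(keyword):
--     # manual ASCII uppercase, same rule as the original (only 'a'..'z' shift)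
--     up = ''.join(chr(ord(c) - 32) if 'a' <= c <= 'z' else c for c in keyword)
--
--     # rank each letter: first occurrence index in up if present, else after all
--     # present letters, in alphabetical order
--     def key(L):
--         i = up.find(L)
--         return i if i >= 0 else len(up) + ord(L)
--
--     return sorted("ABCDEFGHIJKLMNOPQRSTUVWXYZ", key=key)
-- ===== Notes on version B (the rewrite author's own statement) =====
-- stated objective: faster
-- what changed: Replaces A's dedup machinery (two while-loop scans with an inner linear search over a growing seen list, plus per-char string +=) by sorting the fixed 26-letter alphabet with a computed key: first-occurrence index in the uppercased keyword if present, else len(up)+ord(letter).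
import Mathlib
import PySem

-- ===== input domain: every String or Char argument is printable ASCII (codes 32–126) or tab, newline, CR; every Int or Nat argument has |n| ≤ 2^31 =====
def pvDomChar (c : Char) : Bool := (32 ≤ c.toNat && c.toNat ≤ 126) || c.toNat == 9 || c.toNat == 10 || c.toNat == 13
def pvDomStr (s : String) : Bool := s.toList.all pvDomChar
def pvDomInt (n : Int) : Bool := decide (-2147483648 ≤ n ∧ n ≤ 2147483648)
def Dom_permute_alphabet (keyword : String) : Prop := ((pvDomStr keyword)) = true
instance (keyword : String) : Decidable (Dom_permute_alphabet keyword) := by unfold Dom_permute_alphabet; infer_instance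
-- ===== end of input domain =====

-- B replaces A's seen-list dedup scans by sorting the fixed alphabet with a first-occurrence key: an alternative algorithm of similar cost.

-- ===== PORT A =====
-- A's inner 'while j < len(seen): if c == seen[j]: already = True; break' linear scan
def pvInSeenA (seen : List Char) (c : Char) : Bool :=
  match seen with
  | [] => false
  | x :: rest => if c == x then true else pvInSeenA rest c

-- A's first scan body: if (not already) and ('A' <= c <= 'Z'): perm.append(c); seen.append(c)
def pvStepKwA (st : List Char × List String) (c : Char) : List Char × List String :=
  if (!pvInSeenA st.1 c) && ('A' ≤ c && c ≤ 'Z') then (st.1 ++ [c], st.2 ++ [String.ofList [c]]) else st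

-- A's second scan body (over the fixed alphabet): if not already: append
def pvStepAlA (st : List Char × List String) (c : Char) : List Char × List String :=
  if !pvInSeenA st.1 c then (st.1 ++ [c], st.2 ++ [String.ofList [c]]) else st

def permute_alphabet (keyword : String) : List String :=
  -- manual uppercase while-loop: upper_keyword += shifted c
  let upper : List Char :=
    keyword.toList.foldl (fun acc c => acc ++ [if 'a' ≤ c ∧ c ≤ 'z' then Char.ofNat (c.toNat - 32) else c]) []
  let st1 := upper.foldl pvStepKwA ([], [])
  let st2 := (['A','B','C','D','E','F','G','H','I','J','K','L','M','N','O','P','Q','R','S','T','U','V','W','X','Y','Z'] : List Char).foldl pvStepAlA st1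
  st2.2

-- ===== PORT B =====
def pvUpB (c : Char) : Char := if 'a' ≤ c ∧ c ≤ 'z' then Char.ofNat (c.toNat - 32) else c

-- B's key(L): i = up.find(L); i if i >= 0 else len(up) + ord(L)
def pvKeyB (up : List Char) (L : Char) : Int :=
  let i := PySem.Chars.find up [L]
  if 0 ≤ i then i else (up.length : Int) + (L.toNat : Int)

def permute_alphabet_alt (keyword : String) : List String :=
  let up : List Char := keyword.toList.map pvUpB
  (PySem.List.sorted (['A','B','C','D','E','F','G','H','I','J','K','L','M','N','O','P','Q','R','S','T','U','V','W','X','Y','Z'] : List Char) (pvKeyB up) false).map (fun c => String.ofList [c])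

-- ===== PRECONDITION & SPEC =====
def Spec_permute_alphabet (keyword : String) (out : List String) : Prop := out = permute_alphabet_alt keyword
instance (keyword : String) (out : List String) : Decidable (Spec_permute_alphabet keyword out) := by unfold Spec_permute_alphabet; infer_instance

-- ===== CLAIM (what is proved, stated in full; the proofs are below) =====
def Claim_equal_permute_alphabet : Prop := ∀ (keyword : String), Dom_permute_alphabet keyword → Spec_permute_alphabet keyword (permute_alphabet keyword)

-- ===== LEMMAS AND PROOFS =====

def pvAlpha : List Char := ['A','B','C','D','E','F','G','H','I','J','K','L','M','N','O','P','Q','R','S','T','U','V','W','X','Y','Z']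

def pvAZ (c : Char) : Bool := 'A' ≤ c && c ≤ 'Z'

-- char-level shadow of A's loop-1 fold (same condition text as pvStepKwA)
def pvF1 (s : List Char) (u : List Char) : List Char :=
  u.foldl (fun s c => if (!pvInSeenA s c) && ('A' ≤ c && c ≤ 'Z') then s ++ [c] else s) s

-- char-level shadow of A's loop-2 fold
def pvF2 (s : List Char) (u : List Char) : List Char :=
  u.foldl (fun s c => if !pvInSeenA s c then s ++ [c] else s) s

theorem pvInSeenA_eq_mem (seen : List Char) (c : Char) : pvInSeenA seen c = decide (c ∈ seen) := by
  induction seen with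
  | nil => rfl
  | cons x rest ih =>
    simp only [pvInSeenA, ih, List.mem_cons]
    by_cases h : c = x <;> simp [h]

-- loop 1 keeps perm = seen.map mkStr
theorem pvLoop1 (u : List Char) (s : List Char) :
    u.foldl pvStepKwA (s, s.map (fun c => String.ofList [c]))
      = (pvF1 s u, (pvF1 s u).map (fun c => String.ofList [c])) := by
  induction u generalizing s with
  | nil => rfl
  | cons c u ih =>
    simp only [List.foldl_cons, pvF1, pvStepKwA]
    by_cases h : ((!pvInSeenA s c) && ('A' ≤ c && c ≤ 'Z')) = true
    · rw [if_pos h, if_pos h]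
      have e : s.map (fun c => String.ofList [c]) ++ [String.ofList [c]]
          = (s ++ [c]).map (fun c => String.ofList [c]) := by simp
      rw [e]
      exact ih (s ++ [c])
    · rw [if_neg h, if_neg h]
      exact ih s

-- loop 2 keeps perm = seen.map mkStr
theorem pvLoop2 (u : List Char) (s : List Char) :
    u.foldl pvStepAlA (s, s.map (fun c => String.ofList [c]))
      = (pvF2 s u, (pvF2 s u).map (fun c => String.ofList [c])) := by
  induction u generalizing s with
  | nil => rfl
  | cons c u ih =>
    simp only [List.foldl_cons, pvF2, pvStepAlA]
    by_cases h : (!pvInSeenA s c) = true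
    · rw [if_pos h, if_pos h]
      have e : s.map (fun c => String.ofList [c]) ++ [String.ofList [c]]
          = (s ++ [c]).map (fun c => String.ofList [c]) := by simp
      rw [e]
      exact ih (s ++ [c])
    · rw [if_neg h, if_neg h]
      exact ih s

-- loop 2 over a nodup list appends exactly the elements missing from the initial seen
theorem pvF2_eq_append_filter (u : List Char) (s : List Char) (hu : u.Nodup) :
    pvF2 s u = s ++ u.filter (fun c => !decide (c ∈ s)) := by
  induction u generalizing s with
  | nil => simp [pvF2]
  | cons c u ih =>
    simp only [List.nodup_cons] at hu
    simp only [pvF2, List.foldl_cons, pvInSeenA_eq_mem, List.filter_cons]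
    by_cases h : c ∈ s
    · rw [if_neg (by simp [h])]
      have := ih s hu.2
      simp only [pvF2, pvInSeenA_eq_mem] at this
      rw [this]
      simp [h]
    · rw [if_pos (by simp [h])]
      have := ih (s ++ [c]) hu.2
      simp only [pvF2, pvInSeenA_eq_mem] at this
      rw [this]
      have hfe : u.filter (fun x => !decide (x ∈ s ++ [c])) = u.filter (fun x => !decide (x ∈ s)) := by
        apply List.filter_congr
        intro x hx
        have hxc : x ≠ c := fun e => hu.1 (e ▸ hx)
        simp [List.mem_append, hxc]
      rw [hfe]
      simp [h]

-- loop 1's appended part: its members are the fresh A–Z letters of u, without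
-- duplicates, ordered by first occurrence in u
theorem pvF1_props (u : List Char) : ∀ s : List Char,
    ∃ t, pvF1 s u = s ++ t ∧ (∀ a ∈ t, a ∉ s ∧ pvAZ a = true ∧ a ∈ u) ∧ t.Nodup ∧
      t.Pairwise (fun a b => u.idxOf a < u.idxOf b) := by
  induction u with
  | nil => intro s; exact ⟨[], by simp [pvF1]⟩
  | cons c u ih =>
    intro s
    simp only [pvF1, List.foldl_cons, pvInSeenA_eq_mem]
    by_cases h : ((!decide (c ∈ s)) && ('A' ≤ c && c ≤ 'Z')) = true
    · rw [if_pos h]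
      simp only [Bool.and_eq_true, Bool.not_eq_true', decide_eq_false_iff_not] at h
      obtain ⟨t, ht, hmem, hnd, hpw⟩ := ih (s ++ [c])
      simp only [pvF1, pvInSeenA_eq_mem] at ht
      refine ⟨c :: t, ?_, ?_, ?_, ?_⟩
      · rw [ht]; simp
      · intro a ha
        rcases List.mem_cons.mp ha with rfl | ha
        · exact ⟨h.1, by simp [pvAZ, h.2.1, h.2.2], List.mem_cons_self⟩
        · obtain ⟨hns, haz, hu⟩ := hmem a ha
          simp only [List.mem_append, List.mem_singleton] at hns
          push Not at hns
          exact ⟨hns.1, haz, List.mem_cons_of_mem _ hu⟩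
      · refine List.nodup_cons.mpr ⟨fun hc => ?_, hnd⟩
        have := (hmem c hc).1
        simp at this
      · refine List.pairwise_cons.mpr ⟨?_, ?_⟩
        · intro a ha
          have hne : c ≠ a := by
            have := (hmem a ha).1
            simp only [List.mem_append, List.mem_singleton] at this
            push Not at this
            exact fun e => this.2 e.symm
          rw [List.idxOf_cons_self, List.idxOf_cons_ne _ hne]
          exact Nat.succ_pos _
        · refine hpw.imp_of_mem ?_
          intro a b ha hb hab
          have hnea : c ≠ a := by
            have := (hmem a ha).1
            simp only [List.mem_append, List.mem_singleton] at this
            push Not at this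
            exact fun e => this.2 e.symm
          have hneb : c ≠ b := by
            have := (hmem b hb).1
            simp only [List.mem_append, List.mem_singleton] at this
            push Not at this
            exact fun e => this.2 e.symm
          rw [List.idxOf_cons_ne _ hnea, List.idxOf_cons_ne _ hneb]
          omega
    · rw [if_neg h]
      obtain ⟨t, ht, hmem, hnd, hpw⟩ := ih s
      simp only [pvF1, pvInSeenA_eq_mem] at ht
      have hne : ∀ a ∈ t, c ≠ a := by
        intro a ha e
        subst e
        obtain ⟨hns, haz, _⟩ := hmem c ha
        apply h
        have haz' : ('A' ≤ c && c ≤ 'Z') = true := haz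
        simp [hns, haz']
      refine ⟨t, ht, ?_, hnd, ?_⟩
      · intro a ha
        obtain ⟨hns, haz, hu⟩ := hmem a ha
        exact ⟨hns, haz, List.mem_cons_of_mem _ hu⟩
      · refine hpw.imp_of_mem ?_
        intro a b ha hb hab
        rw [List.idxOf_cons_ne _ (hne a ha), List.idxOf_cons_ne _ (hne b hb)]
        omega

-- completeness: every fresh A–Z letter of u lands in loop 1's seen list
theorem pvF1_mem_rev (u : List Char) : ∀ s a, pvAZ a = true → (a ∈ u ∨ a ∈ s) → a ∈ pvF1 s u := by
  induction u with
  | nil => intro s a _ h; simpa [pvF1] using h.resolve_left (by simp)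
  | cons c u ih =>
    intro s a haz h
    simp only [pvF1, List.foldl_cons]
    by_cases hc : ((!pvInSeenA s c) && ('A' ≤ c && c ≤ 'Z')) = true
    · rw [if_pos hc]
      apply ih (s ++ [c]) a haz
      rcases h with h | h
      · rcases List.mem_cons.mp h with rfl | h
        · exact Or.inr (by simp)
        · exact Or.inl h
      · exact Or.inr (by simp [h])
    · rw [if_neg hc]
      apply ih s a haz
      rcases h with h | h
      · rcases List.mem_cons.mp h with rfl | h
        · -- branch not taken: a = c must already be in s (it is A–Z)
          by_cases hm : a ∈ s
          · exact Or.inr hm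
          · exfalso
            apply hc
            have haz' : ('A' ≤ a && a ≤ 'Z') = true := haz
            simp [pvInSeenA_eq_mem, hm, haz']
        · exact Or.inl h
      · exact Or.inr h

-- idxOf is minimal: any position holding a bounds it
theorem pvIdxOf_le (u : List Char) (a : Char) : ∀ i, (hi : i < u.length) → u[i] = a → u.idxOf a ≤ i := by
  induction u with
  | nil => intro i hi; simp at hi
  | cons c u ih =>
    intro i hi h
    by_cases hca : c = a
    · subst hca; simp [List.idxOf_cons_self]
    · cases i with
      | zero => exact absurd (by simpa using h) hca
      | succ j =>
        rw [List.idxOf_cons_ne _ hca]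
        have := ih j (by simpa using hi) (by simpa using h)
        omega

theorem pvSingleton_infix (a : Char) (u : List Char) : [a] <:+: u ↔ a ∈ u := by
  constructor
  · intro h; exact h.sublist.subset (by simp)
  · intro h
    obtain ⟨s, t, rfl⟩ := List.append_of_mem h
    exact ⟨s, t, by simp⟩

-- bridge: up.find(L) for a single char = its idxOf, when present
theorem pvFind_singleton_of_mem (u : List Char) (a : Char) (h : a ∈ u) :
    PySem.Chars.find u [a] = (u.idxOf a : Int) := by
  have hnn : 0 ≤ PySem.Chars.find u [a] :=
    (PySem.Chars.find_nonneg_iff u [a]).mpr ((pvSingleton_infix a u).mpr h)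
  obtain ⟨hpre, hmin⟩ := PySem.Chars.find_spec (s := u) (sub := [a]) hnn
  obtain ⟨t, ht⟩ := hpre
  simp only [List.singleton_append] at ht
  set k := (PySem.Chars.find u [a]).toNat with hk
  have hklt : k < u.length := by
    by_contra hge
    rw [List.drop_eq_nil_of_le (by omega)] at ht
    exact List.cons_ne_nil _ _ ht
  have hget : u[k] = a := by
    have : (u.drop k)[0]'(by rw [← ht]; simp) = a := by
      simp [← ht]
    simpa using this
  have h1 : u.idxOf a ≤ k := pvIdxOf_le u a k hklt hget
  have h2 : ¬ u.idxOf a < k := by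
    intro hlt
    apply hmin (u.idxOf a) hlt
    have hil : u.idxOf a < u.length := List.idxOf_lt_length_iff.mpr h
    refine ⟨u.drop (u.idxOf a + 1), ?_⟩
    rw [List.singleton_append, List.drop_eq_getElem_cons hil, List.getElem_idxOf hil]
  have : u.idxOf a = k := by omega
  omega

theorem pvFind_singleton_of_not_mem (u : List Char) (a : Char) (h : a ∉ u) :
    PySem.Chars.find u [a] = -1 := by
  rw [PySem.Chars.find_eq_neg_one_iff]
  exact fun hc => h ((pvSingleton_infix a u).mp hc)

theorem pvAZ_iff (a : Char) : pvAZ a = true ↔ (65 ≤ a.toNat ∧ a.toNat ≤ 90) := by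
  simp only [pvAZ, Bool.and_eq_true, decide_eq_true_eq]
  rw [Char.le_def, Char.le_def, UInt32.le_iff_toNat_le, UInt32.le_iff_toNat_le]
  exact Iff.rfl

theorem pvMem_alpha_iff (a : Char) : a ∈ pvAlpha ↔ pvAZ a = true := by
  constructor
  · intro h; fin_cases h <;> decide
  · intro h
    rw [pvAZ_iff] at h
    have he : Char.ofNat a.toNat = a := Char.ofNat_toNat a
    have : a.toNat = 65 ∨ a.toNat = 66 ∨ a.toNat = 67 ∨ a.toNat = 68 ∨ a.toNat = 69 ∨
        a.toNat = 70 ∨ a.toNat = 71 ∨ a.toNat = 72 ∨ a.toNat = 73 ∨ a.toNat = 74 ∨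
        a.toNat = 75 ∨ a.toNat = 76 ∨ a.toNat = 77 ∨ a.toNat = 78 ∨ a.toNat = 79 ∨
        a.toNat = 80 ∨ a.toNat = 81 ∨ a.toNat = 82 ∨ a.toNat = 83 ∨ a.toNat = 84 ∨
        a.toNat = 85 ∨ a.toNat = 86 ∨ a.toNat = 87 ∨ a.toNat = 88 ∨ a.toNat = 89 ∨
        a.toNat = 90 := by omega
    rcases this with h|h|h|h|h|h|h|h|h|h|h|h|h|h|h|h|h|h|h|h|h|h|h|h|h|h <;>
      · rw [← he, h]; decide

-- the key facts B's sort needs about A's loop-1 output D and the leftover filter R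
theorem pvSorted_eq (up : List Char) :
    PySem.List.sorted pvAlpha (pvKeyB up) false
      = pvF1 [] up ++ pvAlpha.filter (fun c => !decide (c ∈ pvF1 [] up)) := by
  obtain ⟨D, hD, hmem, hnd, hpw⟩ := pvF1_props up []
  simp only [List.nil_append] at hD
  rw [hD]
  set R := pvAlpha.filter (fun c => !decide (c ∈ D)) with hR
  have hmemD : ∀ a ∈ D, pvAZ a = true ∧ a ∈ up := by
    intro a ha; obtain ⟨_, h1, h2⟩ := hmem a ha; exact ⟨h1, h2⟩
  have hmemR : ∀ a ∈ R, a ∈ pvAlpha ∧ a ∉ up := by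
    intro a ha
    rw [hR, List.mem_filter] at ha
    obtain ⟨hal, hnd'⟩ := ha
    simp only [Bool.not_eq_eq_eq_not, Bool.not_true, decide_eq_false_iff_not] at hnd'
    refine ⟨hal, fun hup => hnd' ?_⟩
    have haz := (pvMem_alpha_iff a).mp hal
    have := pvF1_mem_rev up [] a haz (Or.inl hup)
    rwa [hD] at this
  have hkD : ∀ a ∈ D, pvKeyB up a = (up.idxOf a : Int) := by
    intro a ha
    have hmu := (hmemD a ha).2
    simp only [pvKeyB, pvFind_singleton_of_mem up a hmu]
    rw [if_pos (by positivity)]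
  have hkR : ∀ a ∈ R, pvKeyB up a = (up.length : Int) + (a.toNat : Int) := by
    intro a ha
    have hnu := (hmemR a ha).2
    simp only [pvKeyB, pvFind_singleton_of_not_mem up a hnu]
    norm_num
  apply PySem.List.sorted_eq_of_perm_of_pairwise_lt
  · -- (D ++ R) is a permutation of the alphabet
    have hndR : R.Nodup := List.Nodup.filter _ (by decide : pvAlpha.Nodup)
    have hndDR : (D ++ R).Nodup := by
      rw [List.nodup_append]
      refine ⟨hnd, hndR, ?_⟩
      intro a ha b hb e
      subst e
      rw [hR, List.mem_filter] at hb
      simp only [Bool.not_eq_eq_eq_not, Bool.not_true, decide_eq_false_iff_not] at hb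
      exact hb.2 ha
    rw [List.perm_ext_iff_of_nodup hndDR (by decide : pvAlpha.Nodup)]
    intro x
    simp only [List.mem_append]
    constructor
    · rintro (h | h)
      · exact (pvMem_alpha_iff x).mpr (hmemD x h).1
      · exact (hmemR x h).1
    · intro h
      by_cases hx : x ∈ D
      · exact Or.inl hx
      · exact Or.inr (by rw [hR, List.mem_filter]; simp [h, hx])
  · -- keys strictly increase along D ++ R
    rw [List.pairwise_append]
    refine ⟨?_, ?_, ?_⟩
    · refine hpw.imp_of_mem ?_
      intro a b ha hb hab
      rw [hkD a ha, hkD b hb]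
      exact_mod_cast hab
    · have hpa : pvAlpha.Pairwise (fun a b => a.toNat < b.toNat) := by decide
      have : R.Pairwise (fun a b => a.toNat < b.toNat) := by
        rw [hR]
        exact hpa.sublist List.filter_sublist
      refine this.imp_of_mem ?_
      intro a b ha hb hab
      rw [hkR a ha, hkR b hb]
      omega
    · intro a ha b hb
      rw [hkD a ha, hkR b hb]
      have : up.idxOf a < up.length := List.idxOf_lt_length_iff.mpr (hmemD a ha).2
      omega

-- ===== VERDICT (by name: the statement is the Claim_ definition above) =====
theorem permute_alphabet_spec : Claim_equal_permute_alphabet := by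
  intro keyword _
  show permute_alphabet keyword = permute_alphabet_alt keyword
  simp only [permute_alphabet, permute_alphabet_alt]
  rw [PySem.List.foldl_append_singleton_eq_map, List.nil_append]
  have hup : List.map (fun c => if 'a' ≤ c ∧ c ≤ 'z' then Char.ofNat (c.toNat - 32) else c)
      keyword.toList = keyword.toList.map pvUpB := rfl
  rw [hup]
  set up := keyword.toList.map pvUpB with hupdef
  have h1 : up.foldl pvStepKwA ([], []) = (pvF1 [] up, (pvF1 [] up).map (fun c => String.ofList [c])) := by
    have := pvLoop1 up []
    simpa using this
  rw [h1]
  have h2 := pvLoop2 pvAlpha (pvF1 [] up)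
  have h3 : (pvAlpha.foldl pvStepAlA
      (pvF1 [] up, (pvF1 [] up).map (fun c => String.ofList [c]))).2
      = (pvF2 (pvF1 [] up) pvAlpha).map (fun c => String.ofList [c]) := by
    rw [h2]
  show (pvAlpha.foldl pvStepAlA (pvF1 [] up, (pvF1 [] up).map (fun c => String.ofList [c]))).2
      = (PySem.List.sorted pvAlpha (pvKeyB up) false).map (fun c => String.ofList [c])
  rw [h3, pvSorted_eq up, pvF2_eq_append_filter pvAlpha (pvF1 [] up) (by decide)]
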